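-- pv_equiv track=rewrite | github.com/zezhang94/learning | EPI/primitive_types/closest_same_wight.py | find_closest_same_weight
-- ===== SOURCE A (Python) =====
-- def swap_bits(x, i, j):
--     return x ^ ((1 << i) | (1 << j))
--
-- def find_closest_same_weight(x):
--     source = x
--     count = 0
--     while x > 0:
--         last = x & 1
--         x >>= 1
--         if last != x & 1:
--             return swap_bits(source, count, count + 1)
--         count += 1
-- ===== SOURCE B (Python) =====
-- def find_closest_same_weight(x):
--     if x <= 0:
--         return None
--     diff = x ^ (x >> 1)          # bit i set iff bits i and i+1 of x differ
--     i = (diff & -diff).bit_length() - 1   # lowest such position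
--     return x ^ ((1 << i) | (1 << (i + 1)))
-- ===== Notes on version B (the rewrite author's own statement) =====
-- stated objective: alternative
-- what changed: Replaces A's bit-by-bit scanning loop with a closed-form computation: diff = x ^ (x >> 1) marks where adjacent bits differ, its lowest set bit (diff & -diff) gives the swap position directly.
import Mathlib
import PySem

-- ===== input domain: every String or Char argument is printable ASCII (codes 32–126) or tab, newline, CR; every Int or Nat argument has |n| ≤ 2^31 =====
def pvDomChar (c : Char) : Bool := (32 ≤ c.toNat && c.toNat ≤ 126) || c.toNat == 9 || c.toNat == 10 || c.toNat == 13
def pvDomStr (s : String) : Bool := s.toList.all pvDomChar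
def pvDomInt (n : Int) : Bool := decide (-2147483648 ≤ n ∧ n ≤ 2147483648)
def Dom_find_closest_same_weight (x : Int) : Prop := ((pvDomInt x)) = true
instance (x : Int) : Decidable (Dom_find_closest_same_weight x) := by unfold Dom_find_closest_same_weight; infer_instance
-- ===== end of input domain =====

-- B replaces A's bit-by-bit while loop by the closed-form lowest-set-bit computation on x ^ (x >> 1) (alternative algorithm; not measurably faster at these input sizes).

-- ===== PORT A =====
-- helper: Python's swap_bits(x, i, j) = x ^ ((1 << i) | (1 << j))
def swap_bits (x : Int) (i j : Nat) : Int :=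
  PySem.Int.bxor x (PySem.Int.bor ((1 : Int) <<< i) ((1 : Int) <<< j))

-- termination helper for the while loop (x >>= 1 strictly shrinks a positive x)
theorem pvShiftOneLt (x : Int) (h : 0 < x) : (x >>> (1 : Nat)).toNat < x.toNat := by
  cases x with
  | ofNat n =>
      have hn : 0 < n := by simpa using h
      show ((Int.ofNat (n >>> 1)).toNat) < (Int.ofNat n).toNat
      simp [Nat.shiftRight_succ, Nat.shiftRight_zero]
      omega
  | negSucc n => exact absurd h (not_lt.mpr (le_of_lt (Int.negSucc_lt_zero n)))

-- the while loop of A: state (source, x, count)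
def fcswLoop (source x : Int) (count : Nat) : Option Int :=
  if 0 < x then
    let last := PySem.Int.band x 1
    let x' := x >>> (1 : Nat)
    if last ≠ PySem.Int.band x' 1 then some (swap_bits source count (count + 1))
    else fcswLoop source x' (count + 1)
  else none
termination_by x.toNat
decreasing_by exact pvShiftOneLt x (by assumption)

def find_closest_same_weight (x : Int) : Option Int := fcswLoop x x 0

-- ===== PORT B =====
-- Python's `.bit_length() - 1` is int subtraction; here the argument is always > 0
-- (so bit_length ≥ 1) and Nat subtraction coincides.
def find_closest_same_weight_alt (x : Int) : Option Int :=
  if x ≤ 0 then none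
  else
    let diff := PySem.Int.bxor x (x >>> (1 : Nat))
    let i := PySem.Int.bitLength (PySem.Int.band diff (-diff)) - 1
    some (PySem.Int.bxor x (PySem.Int.bor ((1 : Int) <<< i) ((1 : Int) <<< (i + 1))))

-- ===== PRECONDITION & SPEC =====
def Spec_find_closest_same_weight (x : Int) (out : Option Int) : Prop := out = find_closest_same_weight_alt x
instance (x : Int) (out : Option Int) : Decidable (Spec_find_closest_same_weight x out) := by unfold Spec_find_closest_same_weight; infer_instance

-- ===== CLAIM (what is proved, stated in full; the proofs are below) =====
def Claim_equal_find_closest_same_weight : Prop := ∀ (x : Int), Dom_find_closest_same_weight x → Spec_find_closest_same_weight x (find_closest_same_weight x)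

-- ===== LEMMAS AND PROOFS =====

-- proof-side helper: the first position at which adjacent bits of n differ
def fdp (n : Nat) : Nat :=
  if n < 2 then 0 else if n % 2 ≠ (n / 2) % 2 then 0 else fdp (n / 2) + 1
termination_by n
decreasing_by omega

theorem natCast_shiftRight_one (n : Nat) : ((n : Int) >>> (1 : Nat)) = ((n / 2 : Nat) : Int) := by
  show Int.ofNat (n >>> 1) = Int.ofNat (n / 2)
  simp [Nat.shiftRight_succ, Nat.shiftRight_zero]

theorem band_cast_one (n : Nat) : PySem.Int.band (n : Int) 1 = ((n &&& 1 : Nat) : Int) := by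
  exact_mod_cast PySem.Int.band_natCast n 1

theorem fdp_of_ne (n : Nat) (hp : n % 2 ≠ (n / 2) % 2) : fdp n = 0 := by
  rw [fdp]
  by_cases h1 : n < 2
  · simp [h1]
  · simp [h1, hp]

theorem fdp_of_eq (n : Nat) (h2 : 2 ≤ n) (hp : n % 2 = (n / 2) % 2) : fdp n = fdp (n / 2) + 1 := by
  rw [fdp, if_neg (by omega), if_neg (by simpa using hp)]

theorem fcswLoop_eq (n : Nat) (hn : 0 < n) : ∀ (source : Int) (count : Nat),
    fcswLoop source (n : Int) count = some (swap_bits source (count + fdp n) (count + fdp n + 1)) := by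
  induction n using Nat.strong_induction_on with
  | _ n ih =>
    intro source count
    rw [fcswLoop, if_pos (by exact_mod_cast hn)]
    simp only [natCast_shiftRight_one, band_cast_one]
    by_cases hp : n % 2 = (n / 2) % 2
    · have hne : ¬ (((n &&& 1 : Nat) : Int) ≠ ((n / 2 &&& 1 : Nat) : Int)) := by
        simp [Nat.and_one_is_mod, hp]
      rw [if_neg hne]
      have h2 : 2 ≤ n := by omega
      have hrec := ih (n / 2) (by omega) (by omega) source (count + 1)
      have harg : count + 1 + fdp (n / 2) = count + (fdp (n / 2) + 1) := by omega
      rw [hrec, fdp_of_eq n h2 hp, harg]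
    · have hne : (((n &&& 1 : Nat) : Int) ≠ ((n / 2 &&& 1 : Nat) : Int)) := by
        simp [Nat.and_one_is_mod]
        omega
      rw [if_pos hne, fdp_of_ne n hp]
      simp

theorem and_pred_of_odd (d : Nat) (h : d % 2 = 1) : d &&& (d - 1) = d - 1 := by
  apply Nat.eq_of_testBit_eq
  intro i
  cases i with
  | zero =>
      have h0 : (d - 1) % 2 = 0 := by omega
      simp [Nat.testBit_zero, h0]
  | succ i =>
      have hdiv : (d - 1) / 2 = d / 2 := by omega
      rw [Nat.testBit_and]
      simp only [Nat.testBit_succ, hdiv]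
      simp

theorem two_mul_and (e : Nat) (he : 0 < e) : (2 * e) &&& (2 * e - 1) = 2 * (e &&& (e - 1)) := by
  apply Nat.eq_of_testBit_eq
  intro i
  cases i with
  | zero =>
      have h1 : (2 * e) % 2 = 0 := by omega
      have h2 : (2 * (e &&& (e - 1))) % 2 = 0 := by omega
      simp [Nat.testBit_zero, h1, h2]
  | succ i =>
      have hdiv : (2 * e - 1) / 2 = e - 1 := by omega
      have hdiv2 : (2 * e) / 2 = e := by omega
      have hdiv3 : (2 * (e &&& (e - 1))) / 2 = e &&& (e - 1) := by omega
      rw [Nat.testBit_and]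
      simp only [Nat.testBit_succ, hdiv, hdiv2, hdiv3]
      rw [Nat.testBit_and]

theorem xor_half (n : Nat) (hp : n % 2 = (n / 2) % 2) :
    n ^^^ (n / 2) = 2 * ((n / 2) ^^^ (n / 4)) := by
  apply Nat.eq_of_testBit_eq
  intro i
  cases i with
  | zero =>
      have h2 : (2 * ((n / 2) ^^^ (n / 4))) % 2 = 0 := by omega
      simp [Nat.testBit_zero, h2]
      omega
  | succ i =>
      have hdiv : (2 * ((n / 2) ^^^ (n / 4))) / 2 = (n / 2) ^^^ (n / 4) := by omega
      have hdiv2 : n / 2 / 2 = n / 4 := by omega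
      rw [Nat.testBit_xor]
      simp only [Nat.testBit_succ, hdiv, hdiv2]
      rw [Nat.testBit_xor]

theorem xor_mod_two_of_ne (n : Nat) (hp : n % 2 ≠ (n / 2) % 2) : (n ^^^ n / 2) % 2 = 1 := by
  have h0 : (n ^^^ n / 2).testBit 0 = ((n.testBit 0).xor ((n / 2).testBit 0)) := Nat.testBit_xor n (n / 2) 0
  simp only [Nat.testBit_zero] at h0
  have hn : n % 2 = 0 ∨ n % 2 = 1 := by omega
  have hn2 : (n / 2) % 2 = 0 ∨ (n / 2) % 2 = 1 := by omega
  have hx : (n ^^^ n / 2) % 2 = 0 ∨ (n ^^^ n / 2) % 2 = 1 := by omega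
  rcases hn with h | h <;> rcases hn2 with h' | h' <;>
    simp [h, h'] at h0 hp ⊢ <;> omega

theorem lowbit_xor (n : Nat) (hn : 0 < n) :
    (n ^^^ n / 2) - ((n ^^^ n / 2) &&& ((n ^^^ n / 2) - 1)) = 2 ^ fdp n := by
  induction n using Nat.strong_induction_on with
  | _ n ih =>
    by_cases hp : n % 2 = (n / 2) % 2
    · have h2 : 2 ≤ n := by omega
      have hd : n ^^^ n / 2 = 2 * ((n / 2) ^^^ (n / 4)) := xor_half n hp
      have hdiv2 : n / 2 / 2 = n / 4 := by omega
      have ih' := ih (n / 2) (by omega) (by omega)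
      rw [hdiv2] at ih'
      have he : 0 < (n / 2) ^^^ (n / 4) := by
        have := Nat.two_pow_pos (fdp (n / 2))
        have hle : ((n / 2) ^^^ (n / 4)) &&& (((n / 2) ^^^ (n / 4)) - 1) ≤ (n / 2) ^^^ (n / 4) :=
          Nat.and_le_left
        omega
      rw [hd, two_mul_and _ he]
      have hle : ((n / 2) ^^^ (n / 4)) &&& (((n / 2) ^^^ (n / 4)) - 1) ≤ (n / 2) ^^^ (n / 4) :=
        Nat.and_le_left
      have heq : 2 * ((n / 2) ^^^ (n / 4)) - 2 * (((n / 2) ^^^ (n / 4)) &&& (((n / 2) ^^^ (n / 4)) - 1))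
          = 2 * (((n / 2) ^^^ (n / 4)) - (((n / 2) ^^^ (n / 4)) &&& (((n / 2) ^^^ (n / 4)) - 1))) := by
        omega
      rw [heq, ih', fdp_of_eq n h2 hp, pow_succ]
      ring
    · have hodd := xor_mod_two_of_ne n hp
      rw [and_pred_of_odd _ hodd, fdp_of_ne n hp]
      omega

theorem bitLength_two_pow (k : Nat) : PySem.Int.bitLength ((2 ^ k : Nat) : Int) = k + 1 := by
  induction k with
  | zero => decide
  | succ k ih =>
      rw [PySem.Int.bitLength_natCast (Nat.two_pow_pos (k + 1))]
      have : 2 ^ (k + 1) / 2 = 2 ^ k := by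
        rw [Nat.pow_succ]
        omega
      rw [this, ih]

theorem band_neg_self_cast (d : Nat) (hd : 0 < d) :
    PySem.Int.band (d : Int) (-(d : Int)) = ((d - (d &&& (d - 1)) : Nat) : Int) := by
  unfold PySem.Int.band
  rw [if_pos (by exact_mod_cast Nat.zero_le d), if_neg (by omega)]
  have e1 : (-(-(d : Int)) - 1).toNat = d - 1 := by omega
  have e2 : ((d : Int)).toNat = d := by omega
  rw [e1, e2]

theorem alt_eq (n : Nat) (hn : 0 < n) :
    find_closest_same_weight_alt (n : Int) = some (swap_bits (n : Int) (fdp n) (fdp n + 1)) := by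
  unfold find_closest_same_weight_alt
  rw [if_neg (by exact_mod_cast (by omega : ¬ ((n : Int) ≤ 0)))]
  simp only [natCast_shiftRight_one, PySem.Int.bxor_natCast]
  have hd0 : 0 < n ^^^ n / 2 := by
    have := lowbit_xor n hn
    have := Nat.two_pow_pos (fdp n)
    have hle : (n ^^^ n / 2) &&& ((n ^^^ n / 2) - 1) ≤ n ^^^ n / 2 := Nat.and_le_left
    omega
  rw [band_neg_self_cast _ hd0, lowbit_xor n hn, bitLength_two_pow]
  simp [swap_bits]

-- ===== VERDICT (by name: the statement is the Claim_ definition above) =====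
theorem find_closest_same_weight_spec : Claim_equal_find_closest_same_weight := by
  intro x _
  unfold Spec_find_closest_same_weight
  by_cases hx : x ≤ 0
  · unfold find_closest_same_weight find_closest_same_weight_alt
    rw [fcswLoop, if_neg (not_lt.mpr hx), if_pos hx]
  · have hx' : (0 : Int) < x := lt_of_not_ge hx
    obtain ⟨n, rfl⟩ : ∃ n : Nat, x = (n : Int) := ⟨x.toNat, (Int.toNat_of_nonneg hx'.le).symm⟩
    have hn : 0 < n := by exact_mod_cast hx'
    unfold find_closest_same_weight
    rw [fcswLoop_eq n hn, alt_eq n hn]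
    simp
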